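-- pv_equiv track=rewrite | github.com/Farbfetzen/Advent_of_Code | python/2021/day23.py | get_forbidden_positions
-- ===== SOURCE A (Python) =====
-- def get_forbidden_positions(destinations):
--     """The rooms of other amphipod types are forbidden."""
--     forbidden_positions = {}
--     for name in destinations:
--         positions = set()
--         for other_name, other_positions in destinations.items():
--             if other_name == name:
--                 continue
--             positions.update(other_positions)
--         forbidden_positions[name] = positions
--     return forbidden_positions
-- ===== SOURCE B (Python) =====
-- def get_forbidden_positions(destinations):
--     """The rooms of other amphipod types are forbidden.
--
--     One backward pass builds the suffix unions, one forward pass keeps a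
--     running prefix union; each name's answer is prefix | suffix, so the
--     quadratic re-scan of all other entries disappears.
--     """
--     suffixes = [set()]
--     for positions in reversed(list(destinations.values())):
--         suffixes.insert(0, set(positions) | suffixes[0])
--     result = {}
--     prefix = set()
--     for (name, positions), suffix in zip(destinations.items(), suffixes[1:]):
--         result[name] = prefix | suffix
--         prefix = prefix | set(positions)
--     return result
-- ===== Notes on version B (the rewrite author's own statement) =====
-- stated objective: faster
-- what changed: A rescans the whole dict for every name (nested loops); B builds suffix unions in one backward pass and keeps a running prefix union in one forward pass, so each name's set is one union of two precomputed sets.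
import Mathlib
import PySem

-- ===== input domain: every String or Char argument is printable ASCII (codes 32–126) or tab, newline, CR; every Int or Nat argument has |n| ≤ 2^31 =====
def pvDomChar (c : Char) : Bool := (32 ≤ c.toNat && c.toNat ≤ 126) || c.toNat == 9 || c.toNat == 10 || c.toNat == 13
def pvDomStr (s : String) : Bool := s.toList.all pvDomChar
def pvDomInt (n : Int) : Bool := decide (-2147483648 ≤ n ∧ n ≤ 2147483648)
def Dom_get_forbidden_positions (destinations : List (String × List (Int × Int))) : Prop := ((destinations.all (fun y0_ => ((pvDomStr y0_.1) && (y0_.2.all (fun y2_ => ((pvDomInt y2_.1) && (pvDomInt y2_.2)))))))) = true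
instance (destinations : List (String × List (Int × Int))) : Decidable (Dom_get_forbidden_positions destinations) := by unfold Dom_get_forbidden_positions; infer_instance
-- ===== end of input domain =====

-- B replaces A's quadratic rescan of all other entries by one suffix-union pass
-- plus a running prefix union (objective: faster; return value only).

-- ===== PORT A =====
-- for each name: scan the whole dict again, unioning every other entry's positions
def get_forbidden_positions (destinations : List (String × List (Int × Int))) : List (String × List (Int × Int)) :=
  destinations.foldl (fun acc p =>
    acc ++ [(p.1, destinations.foldl
      (fun (s : PySem.Set (Int × Int)) q => if q.1 == p.1 then s else PySem.Set.update s q.2)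
      PySem.Set.empty)]) []

-- ===== PORT B =====
-- suffixes[i] = union of the value sets from entry i on (built right to left);
-- then one forward pass: answer = prefix-union | suffix-union
def get_forbidden_positions_alt (destinations : List (String × List (Int × Int))) : List (String × List (Int × Int)) :=
  let suffixes := (destinations.map (·.2)).reverse.foldl
      (fun (acc : List (PySem.Set (Int × Int))) l =>
        PySem.Set.union (PySem.Set.ofList l) (acc.headD PySem.Set.empty) :: acc)  -- acc is never empty
      [PySem.Set.empty]
  ((destinations.zip suffixes.tail).foldl
    (fun (st : List (String × List (Int × Int)) × PySem.Set (Int × Int)) pr =>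
      (st.1 ++ [(pr.1.1, PySem.Set.union st.2 pr.2)],
       PySem.Set.union st.2 (PySem.Set.ofList pr.1.2)))
    ([], PySem.Set.empty)).1

-- ===== PRECONDITION & SPEC =====
-- Pre_ excludes association lists with duplicate keys: the argument is a Python
-- dict, which cannot hold two entries with the same key, so such lists encode
-- no dict input and the two ports' values there are accidental.
def Pre_get_forbidden_positions (destinations : List (String × List (Int × Int))) : Prop :=
  (destinations.map (·.1)).Nodup
instance (destinations : List (String × List (Int × Int))) : Decidable (Pre_get_forbidden_positions destinations) := by unfold Pre_get_forbidden_positions; infer_instance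

def pvWitness_get_forbidden_positions : (List (String × List (Int × Int))) :=
  [("A", [(2, 0)]), ("B", [(4, 0), (2, 0)])]

def Spec_get_forbidden_positions (destinations : List (String × List (Int × Int))) (out : List (String × List (Int × Int))) : Prop := out = get_forbidden_positions_alt destinations
instance (destinations : List (String × List (Int × Int))) (out : List (String × List (Int × Int))) : Decidable (Spec_get_forbidden_positions destinations out) := by unfold Spec_get_forbidden_positions; infer_instance

-- ===== CLAIM (what is proved, stated in full; the proofs are below) =====
def Claim_equal_get_forbidden_positions : Prop := ∀ (destinations : List (String × List (Int × Int))), Dom_get_forbidden_positions destinations → Pre_get_forbidden_positions destinations → Spec_get_forbidden_positions destinations (get_forbidden_positions destinations)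

-- ===== LEMMAS AND PROOFS =====

-- common reference form: running prefix set, remaining entries on the right
def pvRefAux (pre : PySem.Set (Int × Int)) : List (String × List (Int × Int)) → List (String × List (Int × Int))
  | [] => []
  | p :: rest =>
      (p.1, PySem.Set.union pre (PySem.Set.ofList ((rest.map (·.2)).flatten))) ::
        pvRefAux (PySem.Set.union pre (PySem.Set.ofList p.2)) rest

theorem pv_update_ofList_right {α : Type} [BEq α] [LawfulBEq α] (s : PySem.Set α) (ys : List α) :
    PySem.Set.update s (PySem.Set.ofList ys) = PySem.Set.update s ys := by
  rw [PySem.Set.update_eq_append_filter, PySem.Set.update_eq_append_filter, PySem.Set.ofList_ofList]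

theorem pv_union_ofList_ofList {α : Type} [BEq α] [LawfulBEq α] (xs ys : List α) :
    PySem.Set.union (PySem.Set.ofList xs) (PySem.Set.ofList ys) = PySem.Set.ofList (xs ++ ys) := by
  show PySem.Set.update _ _ = _
  rw [pv_update_ofList_right, ← PySem.Set.ofList_append]

-- A's inner loop: union of the value lists of all entries whose key differs
theorem pv_innerA (d : List (String × List (Int × Int))) (name : String)
    (s0 : PySem.Set (Int × Int)) :
    d.foldl (fun s q => if q.1 == name then s else PySem.Set.update s q.2) s0
      = PySem.Set.update s0 (((d.filter (fun q => !(q.1 == name))).map (·.2)).flatten) := by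
  induction d generalizing s0 with
  | nil => simp [PySem.Set.update_nil]
  | cons q rest ih =>
    by_cases hq : (q.1 == name) = true
    · rw [List.foldl_cons, if_pos hq, ih, List.filter_cons_of_neg (by simp [hq])]
    · rw [List.foldl_cons, if_neg hq, ih, List.filter_cons_of_pos (by simp [hq]),
        List.map_cons, List.flatten_cons, PySem.Set.update_append]

-- A as a map over the entries
theorem pv_A_map (d : List (String × List (Int × Int))) :
    get_forbidden_positions d
      = d.map (fun p => (p.1,
          PySem.Set.ofList ((((d.filter (fun q => !(q.1 == p.1))).map (·.2)).flatten)))) := by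
  unfold get_forbidden_positions
  rw [PySem.List.foldl_append_singleton_eq_map]
  apply List.map_congr_left
  intro p _
  rw [pv_innerA, PySem.Set.update_empty]

-- the filtered-map form folds into pvRefAux when keys are distinct
theorem pv_A_ref (d pref : List (String × List (Int × Int)))
    (h : ((pref ++ d).map (·.1)).Nodup) :
    d.map (fun p => (p.1,
        PySem.Set.ofList (((((pref ++ d).filter (fun q => !(q.1 == p.1))).map (·.2)).flatten))))
      = pvRefAux (PySem.Set.ofList ((pref.map (·.2)).flatten)) d := by
  induction d generalizing pref with
  | nil => simp [pvRefAux]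
  | cons p rest ih =>
    have hnd : ((pref.map (·.1)) ++ p.1 :: (rest.map (·.1))).Nodup := by
      simpa using h
    have hp : p.1 ∉ (pref.map (·.1)) ∧ p.1 ∉ (rest.map (·.1)) := by
      refine ⟨fun hm => List.disjoint_of_nodup_append hnd hm (by simp), ?_⟩
      exact (List.nodup_cons.mp (List.Nodup.of_append_right hnd)).1
    have hpref : pref.filter (fun q => !(q.1 == p.1)) = pref := by
      apply List.filter_eq_self.mpr
      intro q hq
      simp only [Bool.not_eq_eq_eq_not, Bool.not_true, beq_eq_false_iff_ne, ne_eq]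
      intro he; exact hp.1 (he ▸ List.mem_map_of_mem hq)
    have hrest : rest.filter (fun q => !(q.1 == p.1)) = rest := by
      apply List.filter_eq_self.mpr
      intro q hq
      simp only [Bool.not_eq_eq_eq_not, Bool.not_true, beq_eq_false_iff_ne, ne_eq]
      intro he; exact hp.2 (he ▸ List.mem_map_of_mem hq)
    simp only [List.map_cons, pvRefAux]
    refine List.cons_eq_cons.mpr ⟨?_, ?_⟩
    · -- head entry
      rw [pv_union_ofList_ofList, List.filter_append, hpref,
        List.filter_cons_of_neg (by simp), hrest]
      simp [List.map_append, List.flatten_append]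
    · -- tail entries
      have hassoc : pref ++ p :: rest = (pref ++ [p]) ++ rest := by simp
      have h2 : (((pref ++ [p]) ++ rest).map (·.1)).Nodup := by rw [← hassoc]; exact h
      have hpre2 : PySem.Set.ofList (((pref ++ [p]).map (·.2)).flatten)
          = PySem.Set.union (PySem.Set.ofList ((pref.map (·.2)).flatten)) (PySem.Set.ofList p.2) := by
        rw [pv_union_ofList_ofList]
        simp [List.map_append, List.flatten_append]
      rw [hassoc, ih (pref ++ [p]) h2, hpre2]

-- B's backward pass computes the suffix unions
theorem pv_B_suffix (vals : List (List (Int × Int))) :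
    vals.reverse.foldl
      (fun (acc : List (PySem.Set (Int × Int))) l =>
        PySem.Set.union (PySem.Set.ofList l) (acc.headD PySem.Set.empty) :: acc)
      [PySem.Set.empty]
      = vals.tails.map (fun t => PySem.Set.ofList t.flatten) := by
  induction vals with
  | nil => rfl
  | cons l rest ih =>
    rw [List.reverse_cons, List.foldl_append, ih, List.tails_cons, List.map_cons]
    simp only [List.foldl_cons, List.foldl_nil]
    congr 1
    cases rest with
    | nil =>
      simp [List.flatten_cons]
      rfl
    | cons m r2 =>
      rw [List.tails_cons, List.map_cons, List.headD_cons, pv_union_ofList_ofList]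
      simp [List.flatten_cons]

-- B's forward pass is pvRefAux
theorem pv_B_main (d : List (String × List (Int × Int)))
    (acc : List (String × List (Int × Int))) (pre : PySem.Set (Int × Int)) :
    ((d.zip (d.tails.tail.map (fun t => PySem.Set.ofList ((t.map (·.2)).flatten)))).foldl
      (fun (st : List (String × List (Int × Int)) × PySem.Set (Int × Int)) pr =>
        (st.1 ++ [(pr.1.1, PySem.Set.union st.2 pr.2)],
         PySem.Set.union st.2 (PySem.Set.ofList pr.1.2)))
      (acc, pre)).1 = acc ++ pvRefAux pre d := by
  induction d generalizing acc pre with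
  | nil => simp [pvRefAux]
  | cons p rest ih =>
    have hzip : ((p :: rest).zip ((p :: rest).tails.tail.map
        (fun t => PySem.Set.ofList ((t.map (·.2)).flatten))))
        = (p, PySem.Set.ofList ((rest.map (·.2)).flatten)) ::
          (rest.zip (rest.tails.tail.map (fun t => PySem.Set.ofList ((t.map (·.2)).flatten)))) := by
      cases rest <;> simp
    rw [hzip, List.foldl_cons, ih]
    simp [pvRefAux]

theorem pv_B_ref (d : List (String × List (Int × Int))) :
    get_forbidden_positions_alt d = pvRefAux PySem.Set.empty d := by
  show ((d.zip _).foldl _ ([], PySem.Set.empty)).1 = _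
  rw [pv_B_suffix]
  have ht : ((d.map (·.2)).tails.map (fun t => PySem.Set.ofList t.flatten)).tail
      = d.tails.tail.map (fun t => PySem.Set.ofList ((t.map (·.2)).flatten)) := by
    rw [List.map_tails, List.map_map, ← List.map_tail]
    rfl
  rw [ht, pv_B_main]
  simp

-- ===== VERDICT (by name: the statement is the Claim_ definition above) =====
theorem get_forbidden_positions_spec : Claim_equal_get_forbidden_positions := by
  intro d _ hpre
  unfold Spec_get_forbidden_positions
  rw [pv_B_ref, pv_A_map]
  have := pv_A_ref d [] (by simpa using hpre)
  simpa using this
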